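-- pv_equiv track=rewrite | github.com/blemis/mcp-manager-python | src/mcp_manager/core/discovery.py | _is_mcp_package
-- ===== SOURCE A (Python) =====
-- from typing import Any, Dict, List, Optional
--
-- def _is_mcp_package(
--
--     name: str,
--     description: str,
--     keywords: List[str],
-- ) -> bool:
--     """Check if package is MCP-related."""
--     mcp_indicators = [
--         "mcp",
--         "model-context-protocol",
--         "claude-mcp",
--         "@modelcontextprotocol",
--     ]
--
--     # Check name
--     for indicator in mcp_indicators:
--         if indicator in name.lower():
--             return True
--
--     # Check keywords
--     for keyword in keywords:
--         if any(indicator in keyword.lower() for indicator in mcp_indicators):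
--             return True
--
--     # Check description
--     for indicator in mcp_indicators:
--         if indicator in description.lower():
--             return True
--
--     return False
-- ===== SOURCE B (Python) =====
-- from typing import List
--
--
-- def _is_mcp_package(
--     name: str,
--     description: str,
--     keywords: List[str],
-- ) -> bool:
--     """Check if package is MCP-related."""
--     mcp_indicators = [
--         "mcp",
--         "model-context-protocol",
--         "claude-mcp",
--         "@modelcontextprotocol",
--     ]
--     # One combined lowercase haystack; the space separator cannot occur
--     # inside any indicator, so no spurious cross-field match is possible.
--     text = " ".join([name, description] + keywords).lower()
--     return any(indicator in text for indicator in mcp_indicators)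
-- ===== Notes on version B (the rewrite author's own statement) =====
-- stated objective: simpler
-- what changed: Replaces the three separate phase scans (name loop, per-keyword loop, description loop, each with early return) by building one space-joined lowercase haystack from all fields and doing a single any() substring scan; correctness relies on no indicator containing a space.
import Mathlib
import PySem

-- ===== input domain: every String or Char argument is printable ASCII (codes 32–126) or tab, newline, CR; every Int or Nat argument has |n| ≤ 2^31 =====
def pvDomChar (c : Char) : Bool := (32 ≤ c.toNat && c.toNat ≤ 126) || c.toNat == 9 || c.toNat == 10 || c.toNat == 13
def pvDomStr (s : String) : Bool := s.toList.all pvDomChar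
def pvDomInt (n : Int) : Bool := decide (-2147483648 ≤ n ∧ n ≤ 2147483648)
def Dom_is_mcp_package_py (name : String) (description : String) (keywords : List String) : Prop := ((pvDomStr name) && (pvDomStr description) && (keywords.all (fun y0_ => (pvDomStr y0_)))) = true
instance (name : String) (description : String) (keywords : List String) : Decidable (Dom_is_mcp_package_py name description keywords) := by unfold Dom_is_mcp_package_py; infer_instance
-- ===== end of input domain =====

-- B joins all fields into one lowercase haystack and does a single any() scan
-- instead of A's three separate phase loops with early return (objective: simpler).

-- ===== PORT A =====
def pvIndicatorsA : List String := ["mcp", "model-context-protocol", "claude-mcp", "@modelcontextprotocol"]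

def is_mcp_package_py (name : String) (description : String) (keywords : List String) : Bool :=
  -- Check name
  if pvIndicatorsA.any (fun indicator => PySem.Str.isIn indicator (PySem.Str.lower name)) then true
  -- Check keywords
  else if keywords.any (fun keyword =>
      pvIndicatorsA.any (fun indicator => PySem.Str.isIn indicator (PySem.Str.lower keyword))) then true
  -- Check description
  else if pvIndicatorsA.any (fun indicator => PySem.Str.isIn indicator (PySem.Str.lower description)) then true
  else false

-- ===== PORT B =====
def pvIndicatorsB : List String := ["mcp", "model-context-protocol", "claude-mcp", "@modelcontextprotocol"]

def is_mcp_package_py_alt (name : String) (description : String) (keywords : List String) : Bool :=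
  let text := PySem.Str.lower (PySem.Str.join " " ([name, description] ++ keywords))
  pvIndicatorsB.any (fun indicator => PySem.Str.isIn indicator text)

-- ===== PRECONDITION & SPEC =====
def Spec_is_mcp_package_py (name : String) (description : String) (keywords : List String) (out : Bool) : Prop := out = is_mcp_package_py_alt name description keywords
instance (name : String) (description : String) (keywords : List String) (out : Bool) : Decidable (Spec_is_mcp_package_py name description keywords out) := by unfold Spec_is_mcp_package_py; infer_instance

-- ===== CLAIM (what is proved, stated in full; the proofs are below) =====
def Claim_equal_is_mcp_package_py : Prop := ∀ (name : String) (description : String) (keywords : List String), Dom_is_mcp_package_py name description keywords → Spec_is_mcp_package_py name description keywords (is_mcp_package_py name description keywords)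

-- ===== LEMMAS AND PROOFS =====

-- a space-free pattern is a prefix of a ++ ' ' :: b iff it is a prefix of a
theorem pv_prefix_append_space (p a b : List Char) (h : ' ' ∉ p) :
    p <+: a ++ ' ' :: b ↔ p <+: a := by
  induction a generalizing p with
  | nil =>
    cases p with
    | nil => simp
    | cons x p' =>
      simp only [List.nil_append]
      constructor
      · intro hp
        rcases List.cons_prefix_cons.mp hp with ⟨rfl, -⟩
        exact absurd (List.mem_cons_self) h
      · intro hp
        exact absurd hp (by simp)
  | cons c a' ih =>
    cases p with
    | nil => simp
    | cons x p' =>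
      simp only [List.cons_append, List.cons_prefix_cons]
      have h' : ' ' ∉ p' := fun hm => h (List.mem_cons_of_mem _ hm)
      rw [ih p' h']

-- a space-free pattern is an infix of a ++ ' ' :: b iff it is an infix of a or of b
theorem pv_infix_append_space (p a b : List Char) (h : ' ' ∉ p) :
    p <:+: a ++ ' ' :: b ↔ p <:+: a ∨ p <:+: b := by
  induction a with
  | nil =>
    rw [List.nil_append, List.infix_cons_iff,
      show (' ' :: b) = [] ++ ' ' :: b from rfl, pv_prefix_append_space p [] b h]
    simp
  | cons c a' ih =>
    rw [List.cons_append, List.infix_cons_iff, ih,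
      show (c :: (a' ++ ' ' :: b)) = (c :: a') ++ ' ' :: b from rfl,
      pv_prefix_append_space p (c :: a') b h, ← or_assoc, ← List.infix_cons_iff]

-- a space-free pattern is an infix of the space-join iff it is an infix of some field
theorem pv_infix_join_space (p : List Char) (f : List Char) (fs : List (List Char))
    (h : ' ' ∉ p) :
    p <:+: PySem.Chars.join [' '] (f :: fs) ↔ ∃ s ∈ f :: fs, p <:+: s := by
  induction fs generalizing f with
  | nil => simp [PySem.Chars.join_singleton]
  | cons g fs' ih =>
    rw [PySem.Chars.join_cons_cons, List.append_assoc, List.singleton_append,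
      pv_infix_append_space p f _ h, ih g]
    simp only [List.mem_cons, exists_eq_or_imp]

theorem pv_lowerChar_space : PySem.Chars.lowerChar ' ' = ' ' := by decide

theorem pv_lower_join_space (l : List (List Char)) :
    PySem.Chars.lower (PySem.Chars.join [' '] l)
      = PySem.Chars.join [' '] (l.map PySem.Chars.lower) := by
  induction l with
  | nil => rfl
  | cons f fs ih =>
    cases fs with
    | nil => simp [PySem.Chars.join_singleton]
    | cons g fs' =>
      have hmap : List.map PySem.Chars.lower (f :: g :: fs')
          = PySem.Chars.lower f :: PySem.Chars.lower g :: List.map PySem.Chars.lower fs' := rfl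
      have ih' : PySem.Chars.lower (PySem.Chars.join [' '] (g :: fs'))
          = PySem.Chars.join [' '] (PySem.Chars.lower g :: List.map PySem.Chars.lower fs') := ih
      rw [PySem.Chars.join_cons_cons, hmap, PySem.Chars.join_cons_cons, ← ih']
      simp [PySem.Chars.lower, pv_lowerChar_space]

-- ===== VERDICT (by name: the statement is the Claim_ definition above) =====
theorem is_mcp_package_py_spec : Claim_equal_is_mcp_package_py := by
  intro name description keywords _
  unfold Spec_is_mcp_package_py is_mcp_package_py is_mcp_package_py_alt pvIndicatorsA pvIndicatorsB
  rw [Bool.eq_iff_iff]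
  simp only [List.any_cons, List.any_nil, List.any_eq_true, Bool.or_eq_true,
    PySem.Str.isIn_iff_infix, PySem.Str.toList_lower, PySem.Str.toList_join,
    List.map_cons, List.cons_append, List.nil_append,
    Bool.false_eq_true, or_false]
  rw [show (" " : String).toList = [' '] from rfl, pv_lower_join_space]
  simp only [List.map_cons]
  rw [pv_infix_join_space "mcp".toList _ _ (by decide),
    pv_infix_join_space "model-context-protocol".toList _ _ (by decide),
    pv_infix_join_space "claude-mcp".toList _ _ (by decide),
    pv_infix_join_space "@modelcontextprotocol".toList _ _ (by decide)]
  simp only [List.mem_cons, List.mem_map, exists_eq_or_imp, exists_exists_and_eq_and, and_or_left, exists_or]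
  split_ifs with h1 h2 h3 <;> simp_all <;>
    first
      | tauto
      | (rcases h2 with h | h | h | h
         · exact Or.inl (Or.inr h)
         · exact Or.inr (Or.inl (Or.inr h))
         · exact Or.inr (Or.inr (Or.inl (Or.inr h)))
         · exact Or.inr (Or.inr (Or.inr (Or.inr h))))
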